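-- pv_equiv track=rewrite | github.com/smartmean/TransformingACtoTA | infrastructure/xml_generator.py | _sort_declarations_like_main_beyone
-- ===== SOURCE A (Python) =====
-- from typing import List, Dict
--
-- def _sort_declarations_like_main_beyone(declarations: List[str]) -> List[str]:
--     """เรียงลำดับ declarations แบบ Main_Beyone.py"""
--     bool_decls = []
--     chan_decls = []
--     clock_decls = []
--     int_decls = []
--
--     for decl in declarations:
--         if decl.startswith("bool"):
--             bool_decls.append(decl)
--         elif decl.startswith("broadcast chan"):
--             chan_decls.append(decl)
--         elif decl.startswith("clock"):
--             clock_decls.append(decl)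
--         elif decl.startswith("int"):
--             int_decls.append(decl)
--
--     # Main_Beyone.py order: bool, chan, clock, int
--     return bool_decls + chan_decls + clock_decls + int_decls
-- ===== SOURCE B (Python) =====
-- from typing import List, Dict
--
-- def _sort_declarations_like_main_beyone(declarations: List[str]) -> List[str]:
--     """Four independent filtering passes, one per category, concatenated in order."""
--     return ([d for d in declarations if d.startswith("bool")]
--             + [d for d in declarations if d.startswith("broadcast chan")]
--             + [d for d in declarations if d.startswith("clock")]
--             + [d for d in declarations if d.startswith("int")])
-- ===== Notes on version B (the rewrite author's own statement) =====
-- stated objective: simpler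
-- what changed: Replaced the single-pass if/elif partition into four accumulator lists by four independent filter passes (one per prefix) concatenated in category order; equivalent because the four prefixes are mutually exclusive.
import Mathlib
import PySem

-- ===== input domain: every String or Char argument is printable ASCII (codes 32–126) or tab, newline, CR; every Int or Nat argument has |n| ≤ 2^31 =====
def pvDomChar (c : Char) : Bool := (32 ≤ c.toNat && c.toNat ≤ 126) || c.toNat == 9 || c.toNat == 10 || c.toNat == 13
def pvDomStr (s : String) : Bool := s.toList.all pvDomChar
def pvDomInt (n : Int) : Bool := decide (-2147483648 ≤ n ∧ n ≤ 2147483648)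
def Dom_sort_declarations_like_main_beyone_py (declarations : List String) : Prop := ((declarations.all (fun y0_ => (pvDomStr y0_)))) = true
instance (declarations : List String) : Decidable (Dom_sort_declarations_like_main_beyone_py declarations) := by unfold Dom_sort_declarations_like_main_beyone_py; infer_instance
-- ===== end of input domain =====

-- B replaces A's single if/elif partition pass over four accumulators by four
-- independent filter passes concatenated in category order (simpler decomposition).

-- ===== PORT A =====
-- One loop over the declarations, appending into four accumulator lists, then
-- the four lists concatenated in order bool, chan, clock, int.
def sort_declarations_like_main_beyone_py (declarations : List String) : List String :=
  let st := declarations.foldl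
    (fun (acc : List String × List String × List String × List String) decl =>
      let (bool_decls, chan_decls, clock_decls, int_decls) := acc
      if PySem.Str.startswith decl "bool" then
        (bool_decls ++ [decl], chan_decls, clock_decls, int_decls)
      else if PySem.Str.startswith decl "broadcast chan" then
        (bool_decls, chan_decls ++ [decl], clock_decls, int_decls)
      else if PySem.Str.startswith decl "clock" then
        (bool_decls, chan_decls, clock_decls ++ [decl], int_decls)
      else if PySem.Str.startswith decl "int" then
        (bool_decls, chan_decls, clock_decls, int_decls ++ [decl])
      else acc)
    ([], [], [], [])
  st.1 ++ st.2.1 ++ st.2.2.1 ++ st.2.2.2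

-- ===== PORT B =====
-- Four independent filtering passes (the four list comprehensions of Source B), concatenated.
def sort_declarations_like_main_beyone_py_alt (declarations : List String) : List String :=
  declarations.filter (fun d => PySem.Str.startswith d "bool")
    ++ declarations.filter (fun d => PySem.Str.startswith d "broadcast chan")
    ++ declarations.filter (fun d => PySem.Str.startswith d "clock")
    ++ declarations.filter (fun d => PySem.Str.startswith d "int")

-- ===== PRECONDITION & SPEC =====
def Spec_sort_declarations_like_main_beyone_py (declarations : List String) (out : List String) : Prop := out = sort_declarations_like_main_beyone_py_alt declarations
instance (declarations : List String) (out : List String) : Decidable (Spec_sort_declarations_like_main_beyone_py declarations out) := by unfold Spec_sort_declarations_like_main_beyone_py; infer_instance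

-- ===== CLAIM (what is proved, stated in full; the proofs are below) =====
def Claim_equal_sort_declarations_like_main_beyone_py : Prop := ∀ (declarations : List String), Dom_sort_declarations_like_main_beyone_py declarations → Spec_sort_declarations_like_main_beyone_py declarations (sort_declarations_like_main_beyone_py declarations)

-- ===== LEMMAS AND PROOFS =====

-- The four prefixes are pairwise incomparable, so at most one startswith holds.
theorem pv_excl (s p q : String) (hnp : ¬ (p.toList <+: q.toList))
    (hnq : ¬ (q.toList <+: p.toList)) (h : PySem.Str.startswith s p = true) :
    PySem.Str.startswith s q = false := by
  by_contra hq
  rw [Bool.not_eq_false] at hq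
  rw [PySem.Str.startswith_eq, PySem.Chars.startswith_iff] at h hq
  rcases List.prefix_or_prefix_of_prefix h hq with h' | h'
  · exact hnp h'
  · exact hnq h'

-- Loop invariant: the fold over l with accumulators (b,c,k,i) appends exactly
-- the four filtered sublists of l.
theorem pv_loop_inv (l : List String) (b c k i : List String) :
    l.foldl
      (fun (acc : List String × List String × List String × List String) decl =>
        let (bool_decls, chan_decls, clock_decls, int_decls) := acc
        if PySem.Str.startswith decl "bool" then
          (bool_decls ++ [decl], chan_decls, clock_decls, int_decls)
        else if PySem.Str.startswith decl "broadcast chan" then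
          (bool_decls, chan_decls ++ [decl], clock_decls, int_decls)
        else if PySem.Str.startswith decl "clock" then
          (bool_decls, chan_decls, clock_decls ++ [decl], int_decls)
        else if PySem.Str.startswith decl "int" then
          (bool_decls, chan_decls, clock_decls, int_decls ++ [decl])
        else acc)
      (b, c, k, i)
    = (b ++ l.filter (fun d => PySem.Str.startswith d "bool"),
       c ++ l.filter (fun d => PySem.Str.startswith d "broadcast chan"),
       k ++ l.filter (fun d => PySem.Str.startswith d "clock"),
       i ++ l.filter (fun d => PySem.Str.startswith d "int")) := by
  induction l generalizing b c k i with
  | nil => simp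
  | cons d t ih =>
    by_cases hb : PySem.Str.startswith d "bool" = true
    · have h2 := pv_excl d "bool" "broadcast chan" (by decide) (by decide) hb
      have h3 := pv_excl d "bool" "clock" (by decide) (by decide) hb
      have h4 := pv_excl d "bool" "int" (by decide) (by decide) hb
      simp only [List.foldl_cons, hb, h2, h3, h4, Bool.false_eq_true, if_true, if_false,
        ite_true, ite_false]
      rw [ih]
      simp only [List.filter_cons, hb, h2, h3, h4, Bool.false_eq_true, if_true, if_false,
        ite_true, ite_false]
      simp
    · rw [Bool.not_eq_true] at hb
      by_cases hc : PySem.Str.startswith d "broadcast chan" = true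
      · have h3 := pv_excl d "broadcast chan" "clock" (by decide) (by decide) hc
        have h4 := pv_excl d "broadcast chan" "int" (by decide) (by decide) hc
        simp only [List.foldl_cons, hb, hc, h3, h4, Bool.false_eq_true, if_true, if_false,
          ite_true, ite_false]
        rw [ih]
        simp only [List.filter_cons, hb, hc, h3, h4, Bool.false_eq_true, if_true, if_false,
          ite_true, ite_false]
        simp
      · rw [Bool.not_eq_true] at hc
        by_cases hk : PySem.Str.startswith d "clock" = true
        · have h4 := pv_excl d "clock" "int" (by decide) (by decide) hk
          simp only [List.foldl_cons, hb, hc, hk, h4, Bool.false_eq_true, if_true, if_false,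
            ite_true, ite_false]
          rw [ih]
          simp only [List.filter_cons, hb, hc, hk, h4, Bool.false_eq_true, if_true, if_false,
            ite_true, ite_false]
          simp
        · rw [Bool.not_eq_true] at hk
          by_cases hi : PySem.Str.startswith d "int" = true
          · simp only [List.foldl_cons, hb, hc, hk, hi, Bool.false_eq_true, if_true, if_false,
              ite_true, ite_false]
            rw [ih]
            simp only [List.filter_cons, hb, hc, hk, hi, Bool.false_eq_true, if_true, if_false,
              ite_true, ite_false]
            simp
          · rw [Bool.not_eq_true] at hi
            simp only [List.foldl_cons, hb, hc, hk, hi, Bool.false_eq_true, if_true, if_false,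
              ite_true, ite_false]
            rw [ih]
            simp only [List.filter_cons, hb, hc, hk, hi, Bool.false_eq_true, if_true, if_false,
              ite_true, ite_false]

-- ===== VERDICT (by name: the statement is the Claim_ definition above) =====
theorem sort_declarations_like_main_beyone_py_spec : Claim_equal_sort_declarations_like_main_beyone_py := by
  intro declarations _
  unfold Spec_sort_declarations_like_main_beyone_py
  unfold sort_declarations_like_main_beyone_py sort_declarations_like_main_beyone_py_alt
  rw [pv_loop_inv]
  simp
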